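-- pv_equiv track=rewrite | github.com/shamlan27/AI_DOC | backend/ai/symptom_recommender.py | extract_specialty_hints
-- ===== SOURCE A (Python) =====
-- from collections import Counter, defaultdict
--
-- SPECIALTY_HINTS = {
--     "Neurologist": {"migraine", "seizure", "tremor", "dizziness", "numbness", "memory", "headache"},
--     "Cardiologist": {"angina", "hypertension", "palpitations", "heartbeat", "dyspnea", "cardiac"},
--     "Dermatologist": {"rash", "eczema", "acne", "itching", "hives", "pigmentation", "skin"},
--     "General Physician": {"fever", "cough", "cold", "infection", "vomiting", "diarrhea", "weakness"},
--     "Pediatrician": {"child", "newborn", "infant", "vaccination", "pediatric", "feeding"},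
--     "Orthopedic Surgeon": {"fracture", "sprain", "joint", "knee", "shoulder", "bone", "injury"},
--     "Psychiatrist": {"anxiety", "depression", "insomnia", "panic", "stress", "mood", "trauma"},
--     "ENT Specialist": {"sinus", "tonsil", "ear", "throat", "nasal", "hearing", "voice"},
--     "Ophthalmologist": {
--         "eye",
--         "ocular",
--         "vision",
--         "blur",
--         "redness",
--         "itch",
--         "water",
--         "discharge",
--         "eyelid",
--         "photophobia",
--         "eye_pain",
--     },
--     "Gynecologist": {"pelvic", "pregnancy", "menstrual", "periods", "fertility", "hormonal", "vaginal"},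
--     "Endocrinologist": {"diabetes", "thyroid", "hormone", "insulin", "glucose", "endocrine"},
--     "Dentist": {"tooth", "toothache", "dental", "gum", "gums", "cavity", "molar", "jaw"},
-- }
--
-- def extract_specialty_hints(tokens):
--     hints = Counter()
--     token_set = set(tokens)
--     for specialty, keywords in SPECIALTY_HINTS.items():
--         overlap = token_set.intersection(keywords)
--         if overlap:
--             hints[specialty] += len(overlap)
--     return hints
-- ===== SOURCE B (Python) =====
-- from collections import Counter
--
-- # Inverted index: each keyword maps to the specialty that owns it.
-- KEYWORD_TO_SPECIALTY = {
--     "migraine": "Neurologist",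
--     "seizure": "Neurologist",
--     "tremor": "Neurologist",
--     "dizziness": "Neurologist",
--     "numbness": "Neurologist",
--     "memory": "Neurologist",
--     "headache": "Neurologist",
--     "angina": "Cardiologist",
--     "hypertension": "Cardiologist",
--     "palpitations": "Cardiologist",
--     "heartbeat": "Cardiologist",
--     "dyspnea": "Cardiologist",
--     "cardiac": "Cardiologist",
--     "rash": "Dermatologist",
--     "eczema": "Dermatologist",
--     "acne": "Dermatologist",
--     "itching": "Dermatologist",
--     "hives": "Dermatologist",
--     "pigmentation": "Dermatologist",
--     "skin": "Dermatologist",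
--     "fever": "General Physician",
--     "cough": "General Physician",
--     "cold": "General Physician",
--     "infection": "General Physician",
--     "vomiting": "General Physician",
--     "diarrhea": "General Physician",
--     "weakness": "General Physician",
--     "child": "Pediatrician",
--     "newborn": "Pediatrician",
--     "infant": "Pediatrician",
--     "vaccination": "Pediatrician",
--     "pediatric": "Pediatrician",
--     "feeding": "Pediatrician",
--     "fracture": "Orthopedic Surgeon",
--     "sprain": "Orthopedic Surgeon",
--     "joint": "Orthopedic Surgeon",
--     "knee": "Orthopedic Surgeon",
--     "shoulder": "Orthopedic Surgeon",
--     "bone": "Orthopedic Surgeon",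
--     "injury": "Orthopedic Surgeon",
--     "anxiety": "Psychiatrist",
--     "depression": "Psychiatrist",
--     "insomnia": "Psychiatrist",
--     "panic": "Psychiatrist",
--     "stress": "Psychiatrist",
--     "mood": "Psychiatrist",
--     "trauma": "Psychiatrist",
--     "sinus": "ENT Specialist",
--     "tonsil": "ENT Specialist",
--     "ear": "ENT Specialist",
--     "throat": "ENT Specialist",
--     "nasal": "ENT Specialist",
--     "hearing": "ENT Specialist",
--     "voice": "ENT Specialist",
--     "eye": "Ophthalmologist",
--     "ocular": "Ophthalmologist",
--     "vision": "Ophthalmologist",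
--     "blur": "Ophthalmologist",
--     "redness": "Ophthalmologist",
--     "itch": "Ophthalmologist",
--     "water": "Ophthalmologist",
--     "discharge": "Ophthalmologist",
--     "eyelid": "Ophthalmologist",
--     "photophobia": "Ophthalmologist",
--     "eye_pain": "Ophthalmologist",
--     "pelvic": "Gynecologist",
--     "pregnancy": "Gynecologist",
--     "menstrual": "Gynecologist",
--     "periods": "Gynecologist",
--     "fertility": "Gynecologist",
--     "hormonal": "Gynecologist",
--     "vaginal": "Gynecologist",
--     "diabetes": "Endocrinologist",
--     "thyroid": "Endocrinologist",
--     "hormone": "Endocrinologist",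
--     "insulin": "Endocrinologist",
--     "glucose": "Endocrinologist",
--     "endocrine": "Endocrinologist",
--     "tooth": "Dentist",
--     "toothache": "Dentist",
--     "dental": "Dentist",
--     "gum": "Dentist",
--     "gums": "Dentist",
--     "cavity": "Dentist",
--     "molar": "Dentist",
--     "jaw": "Dentist",
-- }
--
-- # Specialty names in the original SPECIALTY_HINTS order (fixes output order).
-- SPECIALTIES = [
--     "Neurologist", "Cardiologist", "Dermatologist", "General Physician",
--     "Pediatrician", "Orthopedic Surgeon", "Psychiatrist", "ENT Specialist",
--     "Ophthalmologist", "Gynecologist", "Endocrinologist", "Dentist",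
-- ]
--
--
-- def extract_specialty_hints(tokens):
--     counts = dict.fromkeys(SPECIALTIES, 0)
--     for token in set(tokens):
--         specialty = KEYWORD_TO_SPECIALTY.get(token)
--         if specialty is not None:
--             counts[specialty] += 1
--     return Counter({s: c for s, c in counts.items() if c})
-- ===== Notes on version B (the rewrite author's own statement) =====
-- stated objective: idiomatic
-- what changed: A intersects the deduplicated token set with each specialty's keyword set in turn; B carries its own precomputed inverted keyword-to-specialty dictionary and makes a single pass over the distinct tokens, incrementing a per-specialty counter on each lookup hit, then emits the nonzero counts in specialty order.
import Mathlib
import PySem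

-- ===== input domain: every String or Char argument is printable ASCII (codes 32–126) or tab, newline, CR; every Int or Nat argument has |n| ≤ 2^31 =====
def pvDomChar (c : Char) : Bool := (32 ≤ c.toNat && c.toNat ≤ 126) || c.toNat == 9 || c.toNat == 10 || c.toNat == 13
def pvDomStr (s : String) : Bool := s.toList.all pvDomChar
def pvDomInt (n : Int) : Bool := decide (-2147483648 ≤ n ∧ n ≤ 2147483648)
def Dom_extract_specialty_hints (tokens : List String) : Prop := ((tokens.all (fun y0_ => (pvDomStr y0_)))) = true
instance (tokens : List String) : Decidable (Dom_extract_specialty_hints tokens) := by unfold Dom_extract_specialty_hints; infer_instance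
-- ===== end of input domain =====

-- B replaces A's per-specialty set intersections by its own precomputed inverted
-- keyword→specialty dictionary consulted once per distinct token (objective: idiomatic).

-- ===== PORT A =====
def SPECIALTY_HINTS_L : List (String × List String) := [
  ("Neurologist", ["migraine", "seizure", "tremor", "dizziness", "numbness", "memory", "headache"]),
  ("Cardiologist", ["angina", "hypertension", "palpitations", "heartbeat", "dyspnea", "cardiac"]),
  ("Dermatologist", ["rash", "eczema", "acne", "itching", "hives", "pigmentation", "skin"]),
  ("General Physician", ["fever", "cough", "cold", "infection", "vomiting", "diarrhea", "weakness"]),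
  ("Pediatrician", ["child", "newborn", "infant", "vaccination", "pediatric", "feeding"]),
  ("Orthopedic Surgeon", ["fracture", "sprain", "joint", "knee", "shoulder", "bone", "injury"]),
  ("Psychiatrist", ["anxiety", "depression", "insomnia", "panic", "stress", "mood", "trauma"]),
  ("ENT Specialist", ["sinus", "tonsil", "ear", "throat", "nasal", "hearing", "voice"]),
  ("Ophthalmologist", ["eye", "ocular", "vision", "blur", "redness", "itch", "water", "discharge",
                       "eyelid", "photophobia", "eye_pain"]),
  ("Gynecologist", ["pelvic", "pregnancy", "menstrual", "periods", "fertility", "hormonal", "vaginal"]),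
  ("Endocrinologist", ["diabetes", "thyroid", "hormone", "insulin", "glucose", "endocrine"]),
  ("Dentist", ["tooth", "toothache", "dental", "gum", "gums", "cavity", "molar", "jaw"])]

-- the loop body of A: overlap of the token set with one specialty's keywords
def hintStep (token_set : PySem.Set String) (h : PySem.Dict String Int)
    (p : String × List String) : PySem.Dict String Int :=
  let overlap := PySem.Set.inter token_set p.2
  if overlap ≠ [] then h.insert p.1 (h.getD p.1 0 + (PySem.Set.len overlap : Int)) else h

def extract_specialty_hints (tokens : List String) : List (String × Int) :=
  let token_set : PySem.Set String := PySem.Set.ofList tokens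
  let hints : PySem.Dict String Int :=
    SPECIALTY_HINTS_L.foldl (hintStep token_set) PySem.Dict.empty
  hints.items

-- ===== PORT B =====
-- B's own precomputed inverted index (a literal in Source B too): keyword ↦ owning specialty
def KEYWORD_TO_SPECIALTY : PySem.Dict String String := PySem.Dict.ofList [
  ("migraine", "Neurologist"), ("seizure", "Neurologist"), ("tremor", "Neurologist"), ("dizziness", "Neurologist"), ("numbness", "Neurologist"), ("memory", "Neurologist"), ("headache", "Neurologist"),
  ("angina", "Cardiologist"), ("hypertension", "Cardiologist"), ("palpitations", "Cardiologist"), ("heartbeat", "Cardiologist"), ("dyspnea", "Cardiologist"), ("cardiac", "Cardiologist"),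
  ("rash", "Dermatologist"), ("eczema", "Dermatologist"), ("acne", "Dermatologist"), ("itching", "Dermatologist"), ("hives", "Dermatologist"), ("pigmentation", "Dermatologist"), ("skin", "Dermatologist"),
  ("fever", "General Physician"), ("cough", "General Physician"), ("cold", "General Physician"), ("infection", "General Physician"), ("vomiting", "General Physician"), ("diarrhea", "General Physician"), ("weakness", "General Physician"),
  ("child", "Pediatrician"), ("newborn", "Pediatrician"), ("infant", "Pediatrician"), ("vaccination", "Pediatrician"), ("pediatric", "Pediatrician"), ("feeding", "Pediatrician"),
  ("fracture", "Orthopedic Surgeon"), ("sprain", "Orthopedic Surgeon"), ("joint", "Orthopedic Surgeon"), ("knee", "Orthopedic Surgeon"), ("shoulder", "Orthopedic Surgeon"), ("bone", "Orthopedic Surgeon"), ("injury", "Orthopedic Surgeon"),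
  ("anxiety", "Psychiatrist"), ("depression", "Psychiatrist"), ("insomnia", "Psychiatrist"), ("panic", "Psychiatrist"), ("stress", "Psychiatrist"), ("mood", "Psychiatrist"), ("trauma", "Psychiatrist"),
  ("sinus", "ENT Specialist"), ("tonsil", "ENT Specialist"), ("ear", "ENT Specialist"), ("throat", "ENT Specialist"), ("nasal", "ENT Specialist"), ("hearing", "ENT Specialist"), ("voice", "ENT Specialist"),
  ("eye", "Ophthalmologist"), ("ocular", "Ophthalmologist"), ("vision", "Ophthalmologist"), ("blur", "Ophthalmologist"), ("redness", "Ophthalmologist"), ("itch", "Ophthalmologist"), ("water", "Ophthalmologist"), ("discharge", "Ophthalmologist"), ("eyelid", "Ophthalmologist"), ("photophobia", "Ophthalmologist"), ("eye_pain", "Ophthalmologist"),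
  ("pelvic", "Gynecologist"), ("pregnancy", "Gynecologist"), ("menstrual", "Gynecologist"), ("periods", "Gynecologist"), ("fertility", "Gynecologist"), ("hormonal", "Gynecologist"), ("vaginal", "Gynecologist"),
  ("diabetes", "Endocrinologist"), ("thyroid", "Endocrinologist"), ("hormone", "Endocrinologist"), ("insulin", "Endocrinologist"), ("glucose", "Endocrinologist"), ("endocrine", "Endocrinologist"),
  ("tooth", "Dentist"), ("toothache", "Dentist"), ("dental", "Dentist"), ("gum", "Dentist"), ("gums", "Dentist"), ("cavity", "Dentist"), ("molar", "Dentist"), ("jaw", "Dentist")]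

-- specialty names in the original table order (fixes B's output order)
def SPECIALTIES : List String :=
  ["Neurologist", "Cardiologist", "Dermatologist", "General Physician",
   "Pediatrician", "Orthopedic Surgeon", "Psychiatrist", "ENT Specialist",
   "Ophthalmologist", "Gynecologist", "Endocrinologist", "Dentist"]

-- the loop body of B: one inverted-index lookup per distinct token
def countStep (c : PySem.Dict String Int) (tok : String) : PySem.Dict String Int :=
  match KEYWORD_TO_SPECIALTY.get? tok with
  | some s => c.modify s 0 (· + 1)
  | none => c

def extract_specialty_hints_alt (tokens : List String) : List (String × Int) :=
  let counts0 : PySem.Dict String Int :=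
    PySem.Dict.ofList (SPECIALTIES.map (fun s => (s, (0 : Int))))
  let counts := (PySem.Set.ofList tokens).foldl countStep counts0
  counts.items.filter (fun p => p.2 != 0)

-- ===== PRECONDITION & SPEC =====
def Spec_extract_specialty_hints (tokens : List String) (out : List (String × Int)) : Prop := out = extract_specialty_hints_alt tokens
instance (tokens : List String) (out : List (String × Int)) : Decidable (Spec_extract_specialty_hints tokens out) := by unfold Spec_extract_specialty_hints; infer_instance

-- ===== CLAIM (what is proved, stated in full; the proofs are below) =====
def Claim_equal_extract_specialty_hints : Prop := ∀ (tokens : List String), Dom_extract_specialty_hints tokens → Spec_extract_specialty_hints tokens (extract_specialty_hints tokens)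

-- ===== LEMMAS AND PROOFS =====

set_option maxRecDepth 40000

-- B's literal inverted index is exactly A's table turned inside out
theorem kw_items_eq :
    KEYWORD_TO_SPECIALTY.items
      = SPECIALTY_HINTS_L.flatMap (fun p => p.2.map (fun kw => (kw, p.1))) := by decide

theorem kw_keys_nodup : KEYWORD_TO_SPECIALTY.keys.Nodup := by decide

theorem specs_fst_inj :
    ∀ p ∈ SPECIALTY_HINTS_L, ∀ q ∈ SPECIALTY_HINTS_L, p.1 = q.1 → p = q := by decide

-- lookup in the inverted index ≡ membership in that specialty's keyword list
theorem kw_lookup (p : String × List String) (hp : p ∈ SPECIALTY_HINTS_L) (t : String) :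
    KEYWORD_TO_SPECIALTY.get? t = some p.1 ↔ t ∈ p.2 := by
  rw [PySem.Dict.get?_eq_some_iff_mem_items _ _ _ kw_keys_nodup, kw_items_eq]
  simp only [List.mem_flatMap, List.mem_map, Prod.mk.injEq]
  constructor
  · rintro ⟨q, hq, kw, hkw, h1, h2⟩
    have hqp : q = p := specs_fst_inj q hq p hp h2
    subst hqp; subst h1; exact hkw
  · intro ht; exact ⟨p, hp, t, ht, rfl, rfl⟩

-- B's token loop = a plain counting loop over the successfully-looked-up specialties
theorem fold_countStep_eq (l : List String) (c : PySem.Dict String Int) :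
    l.foldl countStep c
      = (l.filterMap (fun t => KEYWORD_TO_SPECIALTY.get? t)).foldl
          (fun c s => c.modify s 0 (· + 1)) c := by
  induction l generalizing c with
  | nil => rfl
  | cons t l ih =>
    have hcs : ∀ (c : PySem.Dict String Int) (tok : String),
        countStep c tok = match KEYWORD_TO_SPECIALTY.get? tok with
          | some s => c.modify s 0 (· + 1)
          | none => c := fun _ _ => rfl
    rw [List.foldl_cons, List.filterMap_cons, hcs]
    generalize KEYWORD_TO_SPECIALTY.get? t = o
    cases o <;> simp [ih]

theorem count_filterMap (f : String → Option String) (l : List String) (s : String) :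
    (l.filterMap f).count s = l.countP (fun t => f t == some s) := by
  induction l with
  | nil => rfl
  | cons t l ih =>
    simp only [List.filterMap_cons, List.countP_cons]
    cases h : f t with
    | none => simp [ih]
    | some v =>
      by_cases hv : v = s
      · subst hv; simp [ih]
      · simp [ih, hv]

-- A's specialty loop over fresh distinct keys builds exactly the filtered list of counts
theorem foldA_items (ts : PySem.Set String) :
    ∀ (specs : List (String × List String)) (h : PySem.Dict String Int),
    (specs.map Prod.fst).Nodup → (∀ p ∈ specs, h.contains p.1 = false) →
    (specs.foldl (hintStep ts) h).items
      = h.items ++ specs.filterMap (fun p =>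
          let overlap := PySem.Set.inter ts p.2
          if overlap ≠ [] then some (p.1, (PySem.Set.len overlap : Int)) else none) := by
  intro specs
  induction specs with
  | nil =>
    intro h _ _
    rw [List.foldl_nil, List.filterMap_nil, List.append_nil]
  | cons p specs ih =>
    intro h hnd hfresh
    have hfp : h.contains p.1 = false := hfresh p (List.mem_cons_self ..)
    have hnd' : (specs.map Prod.fst).Nodup := (List.nodup_cons.mp hnd).2
    have hpnot : p.1 ∉ specs.map Prod.fst := (List.nodup_cons.mp hnd).1
    rw [List.foldl_cons, List.filterMap_cons]
    by_cases hov : PySem.Set.inter ts p.2 ≠ []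
    · have hstep : hintStep ts h p
          = h.insert p.1 ((PySem.Set.len (PySem.Set.inter ts p.2) : Int)) := by
        simp only [hintStep]
        rw [if_pos hov, PySem.Dict.getD_of_not_contains _ _ hfp, zero_add]
      have hfr2 : ∀ q ∈ specs, (hintStep ts h p).contains q.1 = false := by
        intro q hq
        rw [hstep, PySem.Dict.contains_insert]
        have hne : (q.1 == p.1) = false := by
          simp only [beq_eq_false_iff_ne, ne_eq]
          intro he; exact hpnot (he ▸ List.mem_map_of_mem hq)
        simp [hne, hfresh q (List.mem_cons_of_mem _ hq)]
      rw [ih _ hnd' hfr2, hstep]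
      have : (h.insert p.1 ((PySem.Set.len (PySem.Set.inter ts p.2) : Int))).items
          = h.items ++ [(p.1, (PySem.Set.len (PySem.Set.inter ts p.2) : Int))] := by
        simp [PySem.Dict.insert, hfp]
      rw [this]
      simp [hov]
    · have hstep : hintStep ts h p = h := by
        simp only [hintStep]; rw [if_neg hov]
      rw [hstep, ih _ hnd' (fun q hq => hfresh q (List.mem_cons_of_mem _ hq))]
      simp only [not_not] at hov
      simp [hov]

-- the two per-specialty counts agree
theorem counts_agree (p : String × List String) (hp : p ∈ SPECIALTY_HINTS_L)
    (ts : List String) :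
    PySem.Set.len (PySem.Set.inter ts p.2)
      = (ts.filterMap (fun t => KEYWORD_TO_SPECIALTY.get? t)).count p.1 := by
  rw [count_filterMap]
  have hf : PySem.Set.inter ts p.2
      = ts.filter (fun t => KEYWORD_TO_SPECIALTY.get? t == some p.1) := by
    unfold PySem.Set.inter
    apply List.filter_congr
    intro t _
    rw [Bool.eq_iff_iff]
    constructor
    · intro h
      exact beq_iff_eq.mpr ((kw_lookup p hp t).mpr ((PySem.Set.contains_iff ..).mp h))
    · intro h
      exact (PySem.Set.contains_iff ..).mpr ((kw_lookup p hp t).mp (beq_iff_eq.mp h))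
  rw [PySem.Set.len, hf, List.countP_eq_length_filter]

theorem map_filter_eq_filterMap (specs : List (String × List String))
    (g : String × List String → String × Int) :
    (specs.map g).filter (fun q => q.2 != 0)
      = specs.filterMap (fun p => if (g p).2 ≠ 0 then some (g p) else none) := by
  induction specs with
  | nil => rfl
  | cons p specs ih =>
    simp only [List.map_cons, List.filter_cons, List.filterMap_cons]
    by_cases h : (g p).2 = 0 <;> simp [h, ih]

-- B's zero-initialised counter has exactly A's specialties as keys
theorem counts0_eq :
    SPECIALTIES.map (fun s => (s, (0 : Int)))
      = SPECIALTY_HINTS_L.map (fun p => (p.1, (0 : Int))) := by decide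

theorem counts0_keys :
    (PySem.Dict.ofList (SPECIALTY_HINTS_L.map (fun p => (p.1, (0 : Int))))).keys
      = SPECIALTY_HINTS_L.map Prod.fst := by decide

theorem counts0_keys_nodup :
    (PySem.Dict.ofList (SPECIALTY_HINTS_L.map (fun p => (p.1, (0 : Int))))).keys.Nodup := by decide

theorem counts0_getD :
    ∀ p ∈ SPECIALTY_HINTS_L,
      (PySem.Dict.ofList (SPECIALTY_HINTS_L.map (fun p => (p.1, (0 : Int))))).getD p.1 0 = 0 := by
  decide

theorem kw_values_in_keys :
    ∀ pr ∈ KEYWORD_TO_SPECIALTY.items,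
      (PySem.Dict.ofList (SPECIALTY_HINTS_L.map (fun p => (p.1, (0 : Int))))).keys.contains pr.2
        = true := by decide

-- ===== VERDICT (by name: the statement is the Claim_ definition above) =====
theorem extract_specialty_hints_spec : Claim_equal_extract_specialty_hints := by
  intro tokens _
  show (SPECIALTY_HINTS_L.foldl (hintStep (PySem.Set.ofList tokens)) PySem.Dict.empty).items
      = ((PySem.Set.ofList tokens).foldl countStep
          (PySem.Dict.ofList (SPECIALTIES.map (fun s => (s, (0 : Int)))))).items.filter
          (fun p => p.2 != 0)
  rw [counts0_eq]
  rw [foldA_items (PySem.Set.ofList tokens) SPECIALTY_HINTS_L PySem.Dict.empty (by decide)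
      (by intro q _; simp [PySem.Dict.contains_empty])]
  have hemp : (PySem.Dict.empty : PySem.Dict String Int).items = [] := rfl
  rw [hemp, List.nil_append, fold_countStep_eq]
  have hkeys : (((PySem.Set.ofList tokens).filterMap (fun t => KEYWORD_TO_SPECIALTY.get? t)).foldl
        (fun c s => c.modify s 0 (· + 1))
        (PySem.Dict.ofList (SPECIALTY_HINTS_L.map (fun p => (p.1, (0 : Int)))))).keys
      = (PySem.Dict.ofList (SPECIALTY_HINTS_L.map (fun p => (p.1, (0 : Int))))).keys := by
    rw [PySem.Dict.keys_foldl_modify]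
    rw [PySem.Set.update_eq_append_filter]
    have hnil : (PySem.Set.ofList
          ((PySem.Set.ofList tokens).filterMap (fun t => KEYWORD_TO_SPECIALTY.get? t))).filter
          (fun y => !(PySem.Set.contains
            (PySem.Dict.ofList (SPECIALTY_HINTS_L.map (fun p => (p.1, (0 : Int))))).keys y)) = [] := by
      rw [List.filter_eq_nil_iff]
      intro y hy
      have hyl : y ∈ (PySem.Set.ofList tokens).filterMap (fun t => KEYWORD_TO_SPECIALTY.get? t) :=
        (PySem.Set.mem_ofList ..).mp hy
      obtain ⟨t, _, hgt⟩ := List.mem_filterMap.mp hyl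
      have hmem := PySem.Dict.mem_items_of_get?_eq_some _ hgt
      have hcont := kw_values_in_keys _ hmem
      simp [PySem.Set.contains]
      simpa using hcont
    rw [hnil, List.append_nil]
  have hnodup : (((PySem.Set.ofList tokens).filterMap (fun t => KEYWORD_TO_SPECIALTY.get? t)).foldl
        (fun c s => c.modify s 0 (· + 1))
        (PySem.Dict.ofList (SPECIALTY_HINTS_L.map (fun p => (p.1, (0 : Int)))))).keys.Nodup := by
    rw [hkeys]; exact counts0_keys_nodup
  rw [PySem.Dict.items_eq_map_keys _ hnodup 0, hkeys, counts0_keys, List.map_map,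
      map_filter_eq_filterMap]
  apply List.filterMap_congr
  intro p hp
  have hc := counts_agree p hp (PySem.Set.ofList tokens)
  have hg := PySem.Dict.getD_foldl_modify_add_one
      ((PySem.Set.ofList tokens).filterMap (fun t => KEYWORD_TO_SPECIALTY.get? t))
      (PySem.Dict.ofList (SPECIALTY_HINTS_L.map (fun p => (p.1, (0 : Int))))) p.1
  have h0 := counts0_getD p hp
  simp only [Function.comp_apply, hg, h0, zero_add]
  by_cases hov : PySem.Set.inter (PySem.Set.ofList tokens) p.2 = []
  · have hlen : PySem.Set.len (PySem.Set.inter (PySem.Set.ofList tokens) p.2) = 0 := by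
      rw [hov]; rfl
    have hcnt : ((PySem.Set.ofList tokens).filterMap
        (fun t => KEYWORD_TO_SPECIALTY.get? t)).count p.1 = 0 := by
      exact_mod_cast hc.symm.trans hlen
    simp [hov, hcnt]
  · have hlen : PySem.Set.len (PySem.Set.inter (PySem.Set.ofList tokens) p.2) ≠ 0 := by
      rw [PySem.Set.len]
      simpa [List.length_eq_zero_iff] using hov
    have hcnt : ((PySem.Set.ofList tokens).filterMap
        (fun t => KEYWORD_TO_SPECIALTY.get? t)).count p.1 ≠ 0 := by
      intro h
      exact hlen (by rw [hc, h]; rfl)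
    have hcast : ((((PySem.Set.ofList tokens).filterMap
        (fun t => KEYWORD_TO_SPECIALTY.get? t)).count p.1 : Nat) : Int)
        = (PySem.Set.len (PySem.Set.inter (PySem.Set.ofList tokens) p.2) : Int) := by
      exact_mod_cast hc.symm
    simp [hov, hcast]
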